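-- pv_equiv track=rewrite | github.com/manalidesai-chi/206 | Project1/206project1.py | classSizes
-- ===== SOURCE A (Python) =====
-- def classSizes(data):
-- # Input: list of dictionaries
-- # Output: Return a list of tuples ordered by
-- # ClassName and Class size, e.g
-- # [('Senior', 26), ('Junior', 25), ('Freshman', 21), ('Sophomore', 18)]
--
-- #count num of senior, juniors etc
-- #put in a list of tuples
--
-- # iterate thru dictionaries
-- # look at the clas
-- # make counter fr each clas
--
--
-- 	#Your code here:
-- 	#data = sorted(data, key=lambda k: k[])
-- 	senior = 0
-- 	junior = 0
-- 	fresh = 0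
-- 	soph = 0
--
-- 	for d in data:
-- 		clss = d.get("Class")
--
-- 		if clss == "Senior":
-- 			senior += 1
-- 		elif clss == "Junior":
-- 			junior += 1
-- 		elif clss == "Sophomore":
-- 			soph += 1
-- 		elif clss == "Freshman":
-- 			fresh += 1
--
-- 	tuplist = [ ("Senior", senior), ("Junior", junior), ("Sophomore", soph), ("Freshman", fresh) ]
-- 	tuplist = sorted(tuplist, key = lambda x: x[1], reverse = True)
-- 	return tuplist
-- ===== SOURCE B (Python) =====
-- def classSizes(data):
--     # Sort the class labels, then count runs of adjacent equal labels.
--     counts = {"Senior": 0, "Junior": 0, "Sophomore": 0, "Freshman": 0}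
--     labels = sorted(c for c in (d.get("Class") for d in data) if c in counts)
--     prev = None
--     run = 0
--     for x in labels:
--         if x == prev:
--             run += 1
--         else:
--             if prev is not None:
--                 counts[prev] = run
--             prev = x
--             run = 1
--     if prev is not None:
--         counts[prev] = run
--     return sorted(counts.items(), key=lambda t: t[1], reverse=True)
-- ===== Notes on version B (the rewrite author's own statement) =====
-- stated objective: alternative
-- what changed: Replaces A's single-pass if/elif four-counter tally by a sort-then-group algorithm: the class labels are extracted and sorted, then a run-length scan over adjacent equal labels writes each category's run length into a dict whose items are sorted descending.
import Mathlib
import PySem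

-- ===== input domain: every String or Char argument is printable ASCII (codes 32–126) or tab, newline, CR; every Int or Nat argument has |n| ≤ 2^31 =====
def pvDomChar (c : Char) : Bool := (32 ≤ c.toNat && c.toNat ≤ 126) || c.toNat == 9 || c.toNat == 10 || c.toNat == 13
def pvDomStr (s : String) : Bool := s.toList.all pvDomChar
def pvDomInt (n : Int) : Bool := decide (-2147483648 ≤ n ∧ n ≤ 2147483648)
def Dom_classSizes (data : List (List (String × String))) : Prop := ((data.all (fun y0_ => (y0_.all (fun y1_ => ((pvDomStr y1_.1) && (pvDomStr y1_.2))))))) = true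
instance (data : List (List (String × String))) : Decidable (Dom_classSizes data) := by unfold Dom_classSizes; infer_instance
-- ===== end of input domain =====

-- B replaces A's single-pass four-counter if/elif tally by a different algorithm:
-- sort the class labels, then a run-length scan over adjacent equal labels fills the count dict.

-- ===== PORT A =====
-- state: (senior, junior, soph, fresh), exactly A's four counters
def classSizesStep (s : Int × Int × Int × Int) (d : List (String × String)) : Int × Int × Int × Int :=
  let clss := (PySem.Dict.ofList d).get? "Class"
  if clss = some "Senior" then (s.1 + 1, s.2.1, s.2.2.1, s.2.2.2)
  else if clss = some "Junior" then (s.1, s.2.1 + 1, s.2.2.1, s.2.2.2)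
  else if clss = some "Sophomore" then (s.1, s.2.1, s.2.2.1 + 1, s.2.2.2)
  else if clss = some "Freshman" then (s.1, s.2.1, s.2.2.1, s.2.2.2 + 1)
  else s

def classSizes (data : List (List (String × String))) : List (String × Int) :=
  let st := data.foldl classSizesStep (0, 0, 0, 0)
  let tuplist := [("Senior", st.1), ("Junior", st.2.1), ("Sophomore", st.2.2.1), ("Freshman", st.2.2.2)]
  PySem.List.sorted tuplist (fun x => x.2) true

-- ===== PORT B =====
-- the dict literal {"Senior": 0, "Junior": 0, "Sophomore": 0, "Freshman": 0}
def classSizesInit : PySem.Dict String Int :=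
  PySem.Dict.ofList [("Senior", 0), ("Junior", 0), ("Sophomore", 0), ("Freshman", 0)]

-- one iteration of the run-length loop; state = (counts, prev, run); 'x == prev' is 'prev = some x'
def classSizesRunStep : (PySem.Dict String Int × Option String × Int) → String →
    (PySem.Dict String Int × Option String × Int)
  | (c, prev, run), x =>
    if prev = some x then (c, prev, run + 1)
    else match prev with
      | some p => (c.insert p run, some x, 1)
      | none => (c, some x, 1)

-- the trailing 'if prev is not None: counts[prev] = run'
def classSizesRunFinish : (PySem.Dict String Int × Option String × Int) → PySem.Dict String Int
  | (c, some p, run) => c.insert p run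
  | (c, none, _) => c

def classSizes_alt (data : List (List (String × String))) : List (String × Int) :=
  let counts := classSizesInit
  -- sorted(c for c in (d.get("Class") for d in data) if c in counts): the kept c are strings
  let labels := PySem.List.sorted
    ((data.map (fun d => (PySem.Dict.ofList d).get? "Class")).filterMap
      (fun c => if (match c with | some s => counts.contains s | none => false) then c else none))
    (fun x => x) false
  let counts2 := classSizesRunFinish (labels.foldl classSizesRunStep (counts, none, 0))
  PySem.List.sorted counts2.items (fun t => t.2) true

-- ===== PRECONDITION & SPEC =====
def Spec_classSizes (data : List (List (String × String))) (out : List (String × Int)) : Prop := out = classSizes_alt data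
instance (data : List (List (String × String))) (out : List (String × Int)) : Decidable (Spec_classSizes data out) := by unfold Spec_classSizes; infer_instance

-- ===== CLAIM (what is proved, stated in full; the proofs are below) =====
def Claim_equal_classSizes : Prop := ∀ (data : List (List (String × String))), Dom_classSizes data → Spec_classSizes data (classSizes data)

-- ===== LEMMAS AND PROOFS =====

-- A's fold adds, to each starting counter, the number of rows whose class value is the matching category
lemma classSizes_fold (data : List (List (String × String))) (s : Int × Int × Int × Int) :
    data.foldl classSizesStep s =
      (s.1 + ((data.map (fun d => (PySem.Dict.ofList d).get? "Class")).count (some "Senior") : Int),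
       s.2.1 + ((data.map (fun d => (PySem.Dict.ofList d).get? "Class")).count (some "Junior") : Int),
       s.2.2.1 + ((data.map (fun d => (PySem.Dict.ofList d).get? "Class")).count (some "Sophomore") : Int),
       s.2.2.2 + ((data.map (fun d => (PySem.Dict.ofList d).get? "Class")).count (some "Freshman") : Int)) := by
  induction data generalizing s with
  | nil => simp
  | cons d rest ih =>
    simp only [List.foldl_cons, List.map_cons, ih, classSizesStep]
    by_cases h1 : (PySem.Dict.ofList d).get? "Class" = some "Senior" <;>
      by_cases h2 : (PySem.Dict.ofList d).get? "Class" = some "Junior" <;>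
        by_cases h3 : (PySem.Dict.ofList d).get? "Class" = some "Sophomore" <;>
          by_cases h4 : (PySem.Dict.ofList d).get? "Class" = some "Freshman" <;>
            simp_all <;> ring

-- the filter keeps exactly the occurrences of any key the dict contains
lemma count_filterMap_classes (l : List (Option String)) (k : String)
    (hk : classSizesInit.contains k = true) :
    (l.filterMap (fun c => if (match c with | some s => classSizesInit.contains s | none => false) then c else none)).count k
      = l.count (some k) := by
  induction l with
  | nil => rfl
  | cons c l ih =>
    cases c with
    | none => simpa using ih
    | some s =>
      by_cases hs : classSizesInit.contains s = true
      · simp [hs, List.count_cons, ih]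
      · have hne : some s ≠ some k := by
          intro h
          exact hs (by rw [Option.some.injEq] at h; rw [h]; exact hk)
        simp [hs, ih, hne]

-- a key the init dict contains is one of the four category names
lemma classSizesInit_cases (k : String) (hk : classSizesInit.contains k = true) :
    k = "Senior" ∨ k = "Junior" ∨ k = "Sophomore" ∨ k = "Freshman" := by
  have h : classSizesInit = PySem.Dict.mk [("Senior", 0), ("Junior", 0), ("Sophomore", 0), ("Freshman", 0)] := by rfl
  rw [h] at hk
  simp at hk
  tauto

-- the init dict maps each of its keys to 0
lemma classSizesInit_getD (k : String) (hk : classSizesInit.contains k = true) :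
    classSizesInit.getD k 0 = 0 := by
  rcases classSizesInit_cases k hk with h | h | h | h <;> subst h <;> decide

-- run-length scan over a sorted tail: the final lookup is the count
lemma runScan_getD (xs : List String) (d : PySem.Dict String Int) (p : String) (r : Int)
    (hs : xs.Pairwise (· ≤ ·)) (hp : ∀ y ∈ xs, p ≤ y) (k : String) :
    (classSizesRunFinish (xs.foldl classSizesRunStep (d, some p, r))).getD k 0 =
      if k = p then r + (xs.count p : Int)
      else if k ∈ xs then (xs.count k : Int)
      else d.getD k 0 := by
  induction xs generalizing d p r with
  | nil =>
    simp only [List.foldl_nil, classSizesRunFinish, List.count_nil, List.not_mem_nil]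
    rw [PySem.Dict.getD_insert]
    split_ifs <;> simp_all
  | cons x xs ih =>
    rcases List.pairwise_cons.mp hs with ⟨hx, hs'⟩
    by_cases hxp : p = x
    · subst hxp
      have hstep : classSizesRunStep (d, some p, r) p = (d, some p, r + 1) := by
        simp [classSizesRunStep]
      rw [List.foldl_cons, hstep, ih d p (r + 1) hs' hx]
      by_cases hk : k = p
      · simp only [hk, if_true, List.count_cons_self]
        push_cast
        ring
      · have hmem : k ∈ p :: xs ↔ k ∈ xs := by simp [List.mem_cons, hk]
        simp [hk, hmem, List.count_cons_of_ne (Ne.symm hk)]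
    · have hplt : ∀ y ∈ x :: xs, p < y := by
        intro y hy
        rcases List.mem_cons.mp hy with h | h
        · rw [h]; exact lt_of_le_of_ne (hp x List.mem_cons_self) hxp
        · exact lt_of_lt_of_le (lt_of_le_of_ne (hp x List.mem_cons_self) hxp) (hx y h)
      have hstep : classSizesRunStep (d, some p, r) x = (d.insert p r, some x, 1) := by
        simp [classSizesRunStep, hxp]
      rw [List.foldl_cons, hstep, ih (d.insert p r) x 1 hs' hx]
      have hpnotmem : p ∉ x :: xs := fun hmem => lt_irrefl p (hplt p hmem)
      by_cases hk : k = x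
      · subst hk
        have hkne : k ≠ p := fun h => hpnotmem (h ▸ List.mem_cons_self)
        simp [hkne, List.count_cons_self]; omega
      · by_cases hk2 : k ∈ xs
        · have hkne : k ≠ p := fun h => hpnotmem (List.mem_cons_of_mem x (h ▸ hk2))
          simp [hk, hk2, hkne, List.count_cons_of_ne (Ne.symm hk)]
        · by_cases hkp : k = p
          · subst hkp
            rw [if_neg hk, if_neg hk2, if_pos rfl, List.count_eq_zero_of_not_mem hpnotmem,
              PySem.Dict.getD_insert]
            simp
          · have hkxxs : k ∉ x :: xs := by simp [hk, hk2]
            rw [if_neg hk, if_neg hk2, if_neg hkp, if_neg hkxxs, PySem.Dict.getD_insert, if_neg hkp]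

-- keys are unchanged when every touched key is already present
lemma runScan_keys (xs : List String) (d : PySem.Dict String Int) (p : String) (r : Int)
    (hd : d.contains p = true) (hxs : ∀ y ∈ xs, d.contains y = true) :
    (classSizesRunFinish (xs.foldl classSizesRunStep (d, some p, r))).keys = d.keys := by
  induction xs generalizing d p r with
  | nil =>
    simp only [List.foldl_nil, classSizesRunFinish]
    exact PySem.Dict.keys_insert_of_contains _ _ hd
  | cons x xs ih =>
    have hx : d.contains x = true := hxs x List.mem_cons_self
    by_cases hxp : p = x
    · subst hxp
      have hstep : classSizesRunStep (d, some p, r) p = (d, some p, r + 1) := by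
        simp [classSizesRunStep]
      rw [List.foldl_cons, hstep]
      exact ih d p (r + 1) hd (fun y hy => hxs y (List.mem_cons_of_mem _ hy))
    · have hstep : classSizesRunStep (d, some p, r) x = (d.insert p r, some x, 1) := by
        simp [classSizesRunStep, hxp]
      rw [List.foldl_cons, hstep]
      have hkeys : (d.insert p r).keys = d.keys := PySem.Dict.keys_insert_of_contains _ _ hd
      have ih' := ih (d.insert p r) x 1
        (by rw [PySem.Dict.contains_insert]; simp [hx])
        (fun y hy => by rw [PySem.Dict.contains_insert]; simp [hxs y (List.mem_cons_of_mem _ hy)])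
      rw [ih', hkeys]

-- B computed end-to-end: its tuple list is exactly A's, with counts over the mapped class values
lemma classSizes_alt_eq (data : List (List (String × String))) :
    classSizes_alt data =
      PySem.List.sorted
        [("Senior", ((data.map (fun d => (PySem.Dict.ofList d).get? "Class")).count (some "Senior") : Int)),
         ("Junior", ((data.map (fun d => (PySem.Dict.ofList d).get? "Class")).count (some "Junior") : Int)),
         ("Sophomore", ((data.map (fun d => (PySem.Dict.ofList d).get? "Class")).count (some "Sophomore") : Int)),
         ("Freshman", ((data.map (fun d => (PySem.Dict.ofList d).get? "Class")).count (some "Freshman") : Int))]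
        (fun t => t.2) true := by
  set m := data.map (fun d => (PySem.Dict.ofList d).get? "Class") with hm
  set fl := m.filterMap
      (fun c => if (match c with | some s => classSizesInit.contains s | none => false) then c else none) with hfl
  set labels := PySem.List.sorted fl (fun x => x) false with hlabels
  have hcount : ∀ k : String, classSizesInit.contains k = true → (labels.count k : Int) = (m.count (some k) : Int) := by
    intro k hk
    rw [hlabels, (PySem.List.sorted_perm fl (fun x => x) false).count_eq, hfl,
      count_filterMap_classes m k hk]
  have hgetD : ∀ k : String, classSizesInit.contains k = true →
      (classSizesRunFinish (labels.foldl classSizesRunStep (classSizesInit, none, 0))).getD k 0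
        = (m.count (some k) : Int) := by
    intro k hk
    cases hL : labels with
    | nil =>
      have hc := hcount k hk
      rw [hL] at hc
      simp only [List.count_nil, Nat.cast_zero] at hc
      simp only [List.foldl_nil, classSizesRunFinish]
      rw [classSizesInit_getD k hk, hc]
    | cons x xs =>
      have hs : labels.Pairwise (· ≤ ·) := by
        rw [hlabels]; exact PySem.List.sorted_pairwise fl (fun x => x)
      rw [hL] at hs
      rcases List.pairwise_cons.mp hs with ⟨hx, hs'⟩
      have hstep : classSizesRunStep (classSizesInit, none, 0) x = (classSizesInit, some x, 1) := by
        simp [classSizesRunStep]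
      rw [List.foldl_cons, hstep, runScan_getD xs classSizesInit x 1 hs' hx k]
      have hcnt := hcount k hk
      rw [hL] at hcnt
      by_cases hkx : k = x
      · subst hkx
        rw [← hcnt]
        simp only [if_true, List.count_cons_self]
        push_cast
        ring
      · by_cases hkxs : k ∈ xs
        · rw [← hcnt]
          simp [hkx, hkxs, List.count_cons_of_ne (Ne.symm hkx)]
        · have hz : (x :: xs).count k = 0 :=
            List.count_eq_zero_of_not_mem (by simp [hkx, hkxs])
          rw [← hcnt, hz]
          simp only [hkx, if_false, hkxs, Nat.cast_zero]
          exact classSizesInit_getD k hk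
  have hmemL : ∀ y ∈ labels, classSizesInit.contains y = true := by
    intro y hy
    rw [hlabels] at hy
    have hmem := (PySem.List.mem_sorted fl (fun x => x) false y).mp hy
    rw [hfl] at hmem
    rcases List.mem_filterMap.mp hmem with ⟨c, _, hc⟩
    cases c with
    | none => simp at hc
    | some s =>
      by_cases h : classSizesInit.contains s = true
      · simp only [h, if_true] at hc
        rw [Option.some.injEq] at hc
        rw [← hc]
        exact h
      · simp [h] at hc
  set D := classSizesRunFinish (labels.foldl classSizesRunStep (classSizesInit, none, 0)) with hD
  have hAlt : classSizes_alt data = PySem.List.sorted D.items (fun t => t.2) true := rfl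
  have hkeys : D.keys = ["Senior", "Junior", "Sophomore", "Freshman"] := by
    cases hL : labels with
    | nil => rw [hD, hL]; rfl
    | cons x xs =>
      have hstep : classSizesRunStep (classSizesInit, none, 0) x = (classSizesInit, some x, 1) := by
        simp [classSizesRunStep]
      rw [hD, hL, List.foldl_cons, hstep,
        runScan_keys xs classSizesInit x 1 (hmemL x (by rw [hL]; exact List.mem_cons_self))
          (fun y hy => hmemL y (by rw [hL]; exact List.mem_cons_of_mem _ hy))]
      rfl
  have hnodup : D.keys.Nodup := by rw [hkeys]; decide
  have hitems : D.items = [("Senior", D.getD "Senior" 0), ("Junior", D.getD "Junior" 0),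
      ("Sophomore", D.getD "Sophomore" 0), ("Freshman", D.getD "Freshman" 0)] := by
    rw [PySem.Dict.items_eq_map_keys D hnodup 0, hkeys]
    rfl
  rw [hAlt, hitems, hD, hgetD "Senior" (by decide), hgetD "Junior" (by decide),
    hgetD "Sophomore" (by decide), hgetD "Freshman" (by decide)]

-- ===== VERDICT (by name: the statement is the Claim_ definition above) =====
theorem classSizes_spec : Claim_equal_classSizes := by
  intro data _
  show _ = _
  rw [classSizes_alt_eq]
  simp only [classSizes, classSizes_fold]
  norm_num
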